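-- pv_equiv track=rewrite | github.com/yongchann/problem-solving | 프로그래머스/2/42626. 더 맵게/더 맵게.py | solution
-- ===== SOURCE A (Python) =====
-- from heapq import heappush, heappop, heapify
--
-- def solution(scoville, k):
--     cnt = 0
--     heapify(scoville)
--
--     while True:
--         if scoville[0] >= k:
--             break
--         if len(scoville) < 2:
--             cnt = -1
--             break
--
--         # 두개 꺼내서 합치기
--         s1, s2 = heappop(scoville), heappop(scoville)
--         heappush(scoville, s1 + (s2*2))
--         cnt += 1
--
--     return cnt
-- ===== SOURCE B (Python) =====
-- def solution(scoville, k):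
--     # Two-queue merge: sort once, then exploit that combined scores are produced
--     # in nondecreasing order (valid for nonnegative Scoville scores, the
--     # problem's domain), so a FIFO queue of combined values plus a cursor into
--     # the sorted originals yields each minimum in O(1) -- no heap, no insertion.
--     # NOTE: unlike A, this does not mutate scoville; return-value equivalence only.
--     arr = sorted(scoville)
--     merged = []
--     i = j = 0
--     cnt = 0
--     while True:
--         # peek the overall minimum (IndexError on empty input, like A's scoville[0])
--         if i < len(arr) and (j == len(merged) or arr[i] <= merged[j]):
--             cur = arr[i]
--         else:
--             cur = merged[j]
--         if cur >= k:
--             break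
--         if (len(arr) - i) + (len(merged) - j) < 2:
--             cnt = -1
--             break
--         if i < len(arr) and (j == len(merged) or arr[i] <= merged[j]):
--             s1 = arr[i]; i += 1
--         else:
--             s1 = merged[j]; j += 1
--         if i < len(arr) and (j == len(merged) or arr[i] <= merged[j]):
--             s2 = arr[i]; i += 1
--         else:
--             s2 = merged[j]; j += 1
--         merged.append(s1 + 2 * s2)
--         cnt += 1
--     return cnt
-- ===== Notes on version B (the rewrite author's own statement) =====
-- stated objective: faster
-- what changed: Replaces the heap with a two-queue merge: sort the input once, keep a FIFO queue of combined scores (which come out in nondecreasing order), and take each minimum by comparing the two queue fronts in O(1) instead of a heap push/pop per step.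
import Mathlib
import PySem

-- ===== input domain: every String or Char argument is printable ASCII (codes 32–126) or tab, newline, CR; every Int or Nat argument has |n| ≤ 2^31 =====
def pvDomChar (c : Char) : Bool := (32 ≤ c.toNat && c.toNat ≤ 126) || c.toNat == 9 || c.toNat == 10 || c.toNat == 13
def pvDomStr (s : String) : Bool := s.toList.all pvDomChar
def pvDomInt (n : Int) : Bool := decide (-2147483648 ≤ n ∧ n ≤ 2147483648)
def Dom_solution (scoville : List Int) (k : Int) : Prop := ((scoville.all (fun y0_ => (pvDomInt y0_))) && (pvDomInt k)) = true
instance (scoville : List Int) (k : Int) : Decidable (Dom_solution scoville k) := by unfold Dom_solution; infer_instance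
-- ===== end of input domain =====

-- B replaces the heap with a two-queue merge (sort once, FIFO queue of combined
-- scores); return-value equivalence only: A mutates scoville into a heap, B does
-- not mutate it.

-- ===== PORT A =====
-- A's heap is modelled by the multiset of its elements: heapify is the identity on
-- that multiset, scoville[0] is the heap's minimum, heappop removes one occurrence
-- of the minimum (exact for Int elements), heappush is cons.
def solutionGo (k : Int) (l : List Int) (cnt : Int) : Int :=
  match hm : l.min? with
  | none => cnt          -- scoville[0] raises IndexError in Python; excluded by Pre_
  | some m =>
    if m ≥ k then cnt
    else if l.length < 2 then -1
    else
      match hm2 : (l.erase m).min? with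
      | none => -1       -- unreachable: l.length ≥ 2
      | some m2 =>
        solutionGo k ((m + m2 * 2) :: ((l.erase m).erase m2)) (cnt + 1)
termination_by l.length
decreasing_by
  have h1 : m ∈ l := List.min?_mem hm
  have h2 : m2 ∈ l.erase m := List.min?_mem hm2
  have e1 := List.length_erase_of_mem h1
  have e2 := List.length_erase_of_mem h2
  simp only [List.length_cons]
  omega

def solution (scoville : List Int) (k : Int) : Int :=
  solutionGo k scoville 0

-- ===== PORT B =====
-- Source B keeps the sorted originals `arr` with cursor i and the list `merged` of
-- combined scores with cursor j (a FIFO queue: append at the back, consume at the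
-- front). The port renders the two cursored lists by their active suffixes
-- as = arr[i:] and ms = merged[j:] (the consumed prefixes are never read again).
-- bPop is Source B's front-comparison `if i < len(arr) and (j == len(merged) or
-- arr[i] <= merged[j])`: take from arr if it wins, else from merged, none when
-- both are exhausted (Source B raises IndexError there; excluded by Pre_).
def bPop (as ms : List Int) : Option (Int × List Int × List Int) :=
  match as, ms with
  | a :: as', [] => some (a, as', [])
  | a :: as', b :: ms' => if a ≤ b then some (a, as', b :: ms') else some (b, a :: as', ms')
  | [], b :: ms' => some (b, [], ms')
  | [], [] => none

lemma bPop_length {as ms : List Int} {c : Int} {as' ms' : List Int}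
    (h : bPop as ms = some (c, as', ms')) :
    as'.length + ms'.length + 1 = as.length + ms.length := by
  match as, ms with
  | a :: t, [] => simp [bPop] at h; obtain ⟨_, h1, h2⟩ := h; subst h1; subst h2; simp
  | a :: t, b :: u =>
    simp only [bPop] at h
    split at h <;> (simp at h; obtain ⟨_, h1, h2⟩ := h; subst h1; subst h2; simp) <;> omega
  | [], b :: u => simp [bPop] at h; obtain ⟨_, h1, h2⟩ := h; subst h1; subst h2; simp
  | [], [] => simp [bPop] at h

-- Source B's peek of `cur` and its first pop evaluate the identical front comparison;
-- the port performs it once and reuses the result.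
def solutionAltGo (k : Int) (as ms : List Int) (cnt : Int) : Int :=
  match h : bPop as ms with
  | none => cnt          -- IndexError in Python; excluded by Pre_
  | some (cur, as1, ms1) =>
    if cur ≥ k then cnt
    else if as.length + ms.length < 2 then -1
    else
      match h2 : bPop as1 ms1 with
      | none => -1       -- unreachable: total length ≥ 2
      | some (s2, as2, ms2) =>
        solutionAltGo k as2 (ms2 ++ [cur + 2 * s2]) (cnt + 1)
termination_by as.length + ms.length
decreasing_by
  have e1 := bPop_length h
  have e2 := bPop_length h2
  simp only [List.length_append, List.length_cons, List.length_nil]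
  omega

def solution_alt (scoville : List Int) (k : Int) : Int :=
  solutionAltGo k (PySem.List.sorted scoville (fun x => x) false) [] 0

-- ===== PRECONDITION & SPEC =====
-- Pre_ excludes the empty list, on which both Pythons raise IndexError.
def Pre_solution (scoville : List Int) (k : Int) : Prop := scoville ≠ []
instance (scoville : List Int) (k : Int) : Decidable (Pre_solution scoville k) := by unfold Pre_solution; infer_instance
def pvWitness_solution : List Int × Int := ([1, 2, 3, 9, 10, 12], 7)

def Spec_solution (scoville : List Int) (k : Int) (out : Int) : Prop := out = solution_alt scoville k
instance (scoville : List Int) (k : Int) (out : Int) : Decidable (Spec_solution scoville k out) := by unfold Spec_solution; infer_instance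

-- ===== CLAIM =====
def Claim_equal_solution : Prop := ∀ (scoville : List Int) (k : Int), Dom_solution scoville k → Pre_solution scoville k → Spec_solution scoville k (solution scoville k)

-- ===== LEMMAS AND PROOFS =====

lemma min?_eq_of {c : Int} {t : List Int} (hmem : c ∈ t) (hle : ∀ x ∈ t, c ≤ x) :
    t.min? = some c := by
  rw [List.min?_eq_some_iff]
  exact ⟨hmem, hle⟩

lemma min?_le {c : Int} {t : List Int} (h : t.min? = some c) : ∀ x ∈ t, c ≤ x := by
  exact (List.min?_eq_some_iff.mp h).2

lemma bPop_perm {as ms : List Int} {c : Int} {as' ms' : List Int}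
    (h : bPop as ms = some (c, as', ms')) :
    (c :: (as' ++ ms')).Perm (as ++ ms) := by
  match as, ms with
  | a :: t, [] =>
    simp [bPop] at h; obtain ⟨h0, h1, h2⟩ := h; subst h0; subst h1; subst h2; simp
  | a :: t, b :: u =>
    simp only [bPop] at h
    split at h
    · simp at h; obtain ⟨h0, h1, h2⟩ := h; subst h0; subst h1; subst h2; simp
    · simp at h; obtain ⟨h0, h1, h2⟩ := h; subst h0; subst h1; subst h2
      calc (b :: ((a :: t) ++ u)).Perm ((a :: t) ++ b :: u) := by
            simpa using (List.perm_middle (a := b) (l₁ := a :: t) (l₂ := u)).symm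
  | [], b :: u =>
    simp [bPop] at h; obtain ⟨h0, h1, h2⟩ := h; subst h0; subst h1; subst h2; simp
  | [], [] => simp [bPop] at h

lemma bPop_min {as ms : List Int} {c : Int} {as' ms' : List Int}
    (ha : as.Pairwise (· ≤ ·)) (hm : ms.Pairwise (· ≤ ·))
    (h : bPop as ms = some (c, as', ms')) :
    ∀ x ∈ as ++ ms, c ≤ x := by
  match as, ms with
  | a :: t, [] =>
    simp [bPop] at h; obtain ⟨h0, _, _⟩ := h; subst h0
    intro x hx
    rcases List.mem_append.mp hx with hx | hx
    · rcases List.mem_cons.mp hx with rfl | hx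
      · exact le_refl _
      · exact (List.pairwise_cons.mp ha).1 x hx
    · simp at hx
  | a :: t, b :: u =>
    simp only [bPop] at h
    have hat := (List.pairwise_cons.mp ha).1
    have hbu := (List.pairwise_cons.mp hm).1
    split at h
    · rename_i hab
      simp at h; obtain ⟨h0, _, _⟩ := h; subst h0
      intro x hx
      rcases List.mem_append.mp hx with hx | hx
      · rcases List.mem_cons.mp hx with rfl | hx
        · exact le_refl _
        · exact hat x hx
      · rcases List.mem_cons.mp hx with rfl | hx
        · exact hab
        · exact le_trans hab (hbu x hx)
    · rename_i hab
      simp at h; obtain ⟨h0, _, _⟩ := h; subst h0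
      intro x hx
      rcases List.mem_append.mp hx with hx | hx
      · rcases List.mem_cons.mp hx with rfl | hx
        · omega
        · exact le_trans (by omega) (hat x hx)
      · rcases List.mem_cons.mp hx with rfl | hx
        · exact le_refl _
        · exact hbu x hx
  | [], b :: u =>
    simp [bPop] at h; obtain ⟨h0, _, _⟩ := h; subst h0
    intro x hx
    simp at hx
    rcases hx with rfl | hx
    · exact le_refl _
    · exact (List.pairwise_cons.mp hm).1 x hx
  | [], [] => simp [bPop] at h

lemma bPop_shape {as ms : List Int} {c : Int} {as' ms' : List Int}
    (h : bPop as ms = some (c, as', ms')) :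
    (List.Sublist as' as ∧ ms' = ms) ∨ (as' = as ∧ List.Sublist ms' ms) := by
  match as, ms with
  | a :: t, [] =>
    simp [bPop] at h; obtain ⟨_, h1, h2⟩ := h; subst h1; subst h2
    exact Or.inl ⟨List.sublist_cons_self a t, rfl⟩
  | a :: t, b :: u =>
    simp only [bPop] at h
    split at h
    · simp at h; obtain ⟨_, h1, h2⟩ := h; subst h1; subst h2
      exact Or.inl ⟨List.sublist_cons_self a t, rfl⟩
    · simp at h; obtain ⟨_, h1, h2⟩ := h; subst h1; subst h2
      exact Or.inr ⟨rfl, List.sublist_cons_self b u⟩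
  | [], b :: u =>
    simp [bPop] at h; obtain ⟨_, h1, h2⟩ := h; subst h1; subst h2
    exact Or.inr ⟨rfl, List.sublist_cons_self b u⟩
  | [], [] => simp [bPop] at h

lemma bPop_none_iff {as ms : List Int} : bPop as ms = none ↔ as = [] ∧ ms = [] := by
  match as, ms with
  | a :: t, [] => simp [bPop]
  | a :: t, b :: u => simp only [bPop]; split <;> simp
  | [], b :: u => simp [bPop]
  | [], [] => simp [bPop]

-- the queue-bound invariant: every unconsumed combined score m is at most
-- min1 + 2*min2 of the pool with one copy of m removed (whenever that pool
-- still has two elements)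
def QInv (ms l : List Int) : Prop :=
  ∀ m ∈ ms, ∀ m1 m2, (l.erase m).min? = some m1 →
    ((l.erase m).erase m1).min? = some m2 → m ≤ m1 + 2 * m2

-- minima of l with a non-picked element removed are still the two minima of l
lemma minors {l : List Int} {m m1 m2 : Int}
    (hm1 : l.min? = some m1) (hm2 : (l.erase m1).min? = some m2)
    (hm : m ∈ (l.erase m1).erase m2) :
    (l.erase m).min? = some m1 ∧ ((l.erase m).erase m1).min? = some m2 := by
  have hm1l : m1 ∈ l := List.min?_mem hm1
  have hle1 : ∀ x ∈ l, m1 ≤ x := min?_le hm1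
  have hm2e : m2 ∈ l.erase m1 := List.min?_mem hm2
  have hle2 : ∀ x ∈ l.erase m1, m2 ≤ x := min?_le hm2
  have hml : m ∈ l := (List.erase_sublist).mem ((List.erase_sublist).mem hm)
  -- m1 ∈ l.erase m
  have h1 : m1 ∈ l.erase m := by
    by_cases e : m1 = m
    · subst e
      have c1 : 0 < ((l.erase m1).erase m2).count m1 := List.count_pos_iff.mpr hm
      have c2 : ((l.erase m1).erase m2).count m1 ≤ (l.erase m1).count m1 :=
        (List.erase_sublist).count_le _
      have c3 : (l.erase m1).count m1 = l.count m1 - 1 := List.count_erase_self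
      have : 0 < (l.erase m1).count m1 := lt_of_lt_of_le c1 c2
      have : 2 ≤ l.count m1 := by omega
      have : 0 < (l.erase m1).count m1 := by omega
      exact List.count_pos_iff.mp (by rw [List.count_erase_self]; omega)
    · exact List.mem_erase_of_ne e |>.mpr hm1l
  have g1 : (l.erase m).min? = some m1 :=
    min?_eq_of h1 (fun x hx => hle1 x ((List.erase_sublist).mem hx))
  refine ⟨g1, ?_⟩
  -- m2 ∈ (l.erase m).erase m1 = (l.erase m1).erase m
  rw [List.erase_comm]
  have h2 : m2 ∈ (l.erase m1).erase m := by
    by_cases e : m2 = m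
    · subst e
      have c1 : 0 < ((l.erase m1).erase m2).count m2 := List.count_pos_iff.mpr hm
      have c3 : ((l.erase m1).erase m2).count m2 = (l.erase m1).count m2 - 1 :=
        List.count_erase_self
      exact List.count_pos_iff.mp (by rw [List.count_erase_self]; omega)
    · exact List.mem_erase_of_ne e |>.mpr hm2e
  exact min?_eq_of h2 (fun x hx => hle2 x ((List.erase_sublist).mem hx))

lemma go_eq (k : Int) : ∀ n (as ms l : List Int) (cnt : Int),
    as.length + ms.length = n →
    (as ++ ms).Perm l →
    as.Pairwise (· ≤ ·) → ms.Pairwise (· ≤ ·) →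
    QInv ms l →
    solutionGo k l cnt = solutionAltGo k as ms cnt := by
  intro n
  induction n using Nat.strong_induction_on with
  | _ n ih =>
    intro as ms l cnt hn hp ha hs hq
    rw [solutionGo, solutionAltGo]
    match hmin : l.min?, hb : bPop as ms with
    | none, none => rfl
    | none, some (c, as1, ms1) =>
      exfalso
      have : l = [] := List.min?_eq_none_iff.mp hmin
      subst this
      have : as ++ ms = [] := hp.eq_nil
      rcases List.append_eq_nil_iff.mp this with ⟨e1, e2⟩
      subst e1; subst e2
      simp [bPop] at hb
    | some m1, none =>
      exfalso
      rcases bPop_none_iff.mp hb with ⟨e1, e2⟩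
      subst e1; subst e2
      have : l = [] := hp.symm.eq_nil
      subst this
      simp at hmin
    | some m1, some (c, as1, ms1) =>
      -- c = m1
      have hperm1 : (c :: (as1 ++ ms1)).Perm (as ++ ms) := bPop_perm hb
      have hcl : c ∈ l := hp.mem_iff.mp (hperm1.mem_iff.mp List.mem_cons_self)
      have hm1l : m1 ∈ l := List.min?_mem hmin
      have hcle : ∀ x ∈ as ++ ms, c ≤ x := bPop_min ha hs hb
      have hceq : c = m1 := by
        have h1 : m1 ≤ c := min?_le hmin c hcl
        have h2 : c ≤ m1 := hcle m1 (hp.symm.mem_iff.mp hm1l)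
        omega
      subst hceq
      have hlen : l.length = as.length + ms.length := by
        simpa using hp.length_eq.symm
      by_cases hk : c ≥ k
      · simp [hk]
      · simp only [hk, if_false]
        rw [hlen]
        by_cases h2 : as.length + ms.length < 2
        · simp [h2]
        · simp only [h2, if_false]
          -- pool after first pop
          have hperm2 : (as1 ++ ms1).Perm (l.erase c) := by
            have := hperm1.trans hp
            have h' := this.erase c
            simpa using h'
          have hne2 : l.erase c ≠ [] := by
            intro e
            have h3 := List.length_erase_of_mem hcl
            rw [e] at h3
            simp at h3
            omega
          match hmin2 : (l.erase c).min? with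
          | none => exact absurd (List.min?_eq_none_iff.mp hmin2) hne2
          | some m2 =>
            match hb2 : bPop as1 ms1 with
            | none =>
              exfalso
              rcases bPop_none_iff.mp hb2 with ⟨e1, e2⟩
              subst e1; subst e2
              exact hne2 hperm2.symm.eq_nil
            | some (c2, as2, ms2) =>
              -- sortedness of as1 ms1
              have hshape := bPop_shape hb
              have ha1 : as1.Pairwise (· ≤ ·) := by
                rcases hshape with ⟨h, _⟩ | ⟨h, _⟩
                · exact List.Pairwise.sublist h ha
                · rw [h]; exact ha
              have hs1 : ms1.Pairwise (· ≤ ·) := by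
                rcases hshape with ⟨_, h⟩ | ⟨_, h⟩
                · rw [h]; exact hs
                · exact List.Pairwise.sublist h hs
              -- c2 = m2
              have hperm3 : (c2 :: (as2 ++ ms2)).Perm (as1 ++ ms1) := bPop_perm hb2
              have hc2e : c2 ∈ l.erase c :=
                hperm2.mem_iff.mp (hperm3.mem_iff.mp List.mem_cons_self)
              have hm2e : m2 ∈ l.erase c := List.min?_mem hmin2
              have hc2le : ∀ x ∈ as1 ++ ms1, c2 ≤ x := bPop_min ha1 hs1 hb2
              have hc2eq : c2 = m2 := by
                have h1 : m2 ≤ c2 := min?_le hmin2 c2 hc2e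
                have h2 : c2 ≤ m2 := hc2le m2 (hperm2.symm.mem_iff.mp hm2e)
                omega
              subst hc2eq
              -- new states
              have hperm4 : (as2 ++ ms2).Perm ((l.erase c).erase c2) := by
                have := hperm3.trans hperm2
                have h' := this.erase c2
                simpa using h'
              have hshape2 := bPop_shape hb2
              have ha2 : as2.Pairwise (· ≤ ·) := by
                rcases hshape2 with ⟨h, _⟩ | ⟨h, _⟩
                · exact List.Pairwise.sublist h ha1
                · rw [h]; exact ha1
              have hs2 : ms2.Pairwise (· ≤ ·) := by
                rcases hshape2 with ⟨_, h⟩ | ⟨_, h⟩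
                · rw [h]; exact hs1
                · exact List.Pairwise.sublist h hs1
              have hms2sub : List.Sublist ms2 ms := by
                have h1 : List.Sublist ms1 ms := by
                  rcases hshape with ⟨_, h⟩ | ⟨_, h⟩
                  · rw [h]
                  · exact h
                have h2 : List.Sublist ms2 ms1 := by
                  rcases hshape2 with ⟨_, h⟩ | ⟨_, h⟩
                  · rw [h]
                  · exact h
                exact h2.trans h1
              set v : Int := c + 2 * c2 with hv
              -- bound for the old queue elements that remain
              have hbound : ∀ x ∈ ms2, x ≤ v := by
                intro x hx
                have hxm : x ∈ ms := hms2sub.mem hx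
                have hxp : x ∈ (l.erase c).erase c2 :=
                  hperm4.mem_iff.mp (List.mem_append.mpr (Or.inr hx))
                have hmn := minors hmin hmin2 hxp
                have := hq x hxm c c2 hmn.1 hmn.2
                omega
              have hsv : (ms2 ++ [v]).Pairwise (· ≤ ·) := by
                rw [List.pairwise_append]
                exact ⟨hs2, by simp, by intro a hax b hbx; simp at hbx; subst hbx; exact hbound a hax⟩
              -- permutation for new state
              have hpermN : (as2 ++ (ms2 ++ [v])).Perm (v :: (l.erase c).erase c2) := by
                have h1 : (as2 ++ (ms2 ++ [v])).Perm (v :: (as2 ++ ms2)) := by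
                  rw [← List.append_assoc]
                  simpa using List.perm_append_singleton v (as2 ++ ms2)
                exact h1.trans (hperm4.cons v)
              -- QInv for new state
              have hle2' : ∀ x ∈ l.erase c, c2 ≤ x := min?_le hmin2
              have hqN : QInv (ms2 ++ [v]) ((c + c2 * 2) :: (l.erase c).erase c2) := by
                have hvv : c + c2 * 2 = v := by omega
                rw [hvv]
                intro m hm μ1 μ2 hμ1 hμ2
                have hle3 : ∀ x ∈ (l.erase c).erase c2, c2 ≤ x :=
                  fun x hx => hle2' x ((List.erase_sublist).mem hx)
                by_cases hmv : m = v
                · -- erase v removes the head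
                  subst hmv
                  rw [List.erase_cons_head] at hμ1
                  have hμ1b : c2 ≤ μ1 := hle3 μ1 (List.min?_mem hμ1)
                  rw [List.erase_cons_head] at hμ2
                  have hμ2b : c2 ≤ μ2 :=
                    hle3 μ2 ((List.erase_sublist).mem (List.min?_mem hμ2))
                  have hcc2 : c ≤ c2 := hcle c2 (hperm1.mem_iff.mp
                    (List.mem_cons.mpr (Or.inr (hperm3.mem_iff.mp List.mem_cons_self))))
                  simp only [hv]; omega
                · have hm2' : m ∈ ms2 := by
                    rcases List.mem_append.mp hm with h | h
                    · exact h
                    · simp at h; exact absurd h hmv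
                  have hmle : m ≤ v := hbound m hm2'
                  have hmpool : m ∈ (l.erase c).erase c2 :=
                    hperm4.mem_iff.mp (List.mem_append.mpr (Or.inr hm2'))
                  -- nonnegativity: c2 ≤ m ≤ c + 2*c2 forces 0 ≤ c2 and c2 ≤ v
                  have hc2m : c2 ≤ m := hle3 m hmpool
                  have hcc2 : c ≤ c2 := hcle c2 (hperm1.mem_iff.mp
                    (List.mem_cons.mpr (Or.inr (hperm3.mem_iff.mp List.mem_cons_self))))
                  have hc2nn : 0 ≤ c2 := by simp only [hv] at hmle; omega
                  have hvnn : 0 ≤ v := by simp only [hv]; omega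
                  -- erase m from the new pool: head v stays (m ≠ v)
                  rw [List.erase_cons_tail (by simpa using (fun e => hmv (Eq.symm e)))] at hμ1 hμ2
                  -- μ1, μ2 are members of v :: ((l.erase c).erase c2).erase m
                  have hμ1mem : μ1 ∈ v :: ((l.erase c).erase c2).erase m := List.min?_mem hμ1
                  have hμ2mem : μ2 ∈ v :: ((l.erase c).erase c2).erase m :=
                    (List.erase_sublist).mem (List.min?_mem hμ2)
                  have hμ12 : μ1 ≤ μ2 :=
                    min?_le hμ1 μ2 ((List.erase_sublist).mem (List.min?_mem hμ2))
                  have hcase : ∀ x ∈ v :: ((l.erase c).erase c2).erase m,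
                      x = v ∨ c2 ≤ x := by
                    intro x hx
                    rcases List.mem_cons.mp hx with rfl | hx
                    · exact Or.inl rfl
                    · exact Or.inr (hle3 x ((List.erase_sublist).mem hx))
                  rcases hcase μ2 hμ2mem with h2v | h2b
                  · -- μ2 = v : m ≤ v = μ2, and μ1 ≥ 0
                    have hμ1nn : 0 ≤ μ1 := by
                      rcases hcase μ1 hμ1mem with h1v | h1b
                      · omega
                      · omega
                    omega
                  · rcases hcase μ1 hμ1mem with h1v | h1b
                    · -- μ1 = v : m ≤ v = μ1, μ2 ≥ μ1 ≥ 0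
                      omega
                    · -- both ≥ c2 : μ1 + 2μ2 ≥ 3c2 ≥ c + 2c2 = v ≥ m
                      simp only [hv] at hmle ⊢
                      omega
              -- lengths for the induction
              have e1 := bPop_length hb
              have e2 := bPop_length hb2
              have hr := ih (as2.length + (ms2 ++ [v]).length)
                (by simp only [List.length_append, List.length_cons, List.length_nil]; omega)
                as2 (ms2 ++ [v]) ((c + c2 * 2) :: (l.erase c).erase c2) (cnt + 1)
                rfl
                (by have hvv : c + c2 * 2 = v := by omega
                    rw [hvv]; exact hpermN)
                ha2 hsv hqN
              simpa using hr

-- ===== VERDICT =====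
theorem solution_spec : Claim_equal_solution := by
  intro scoville k _ _
  unfold Spec_solution solution solution_alt
  exact (go_eq k _ (PySem.List.sorted scoville (fun x => x) false) [] scoville 0 rfl
    (by simpa using PySem.List.sorted_perm scoville (fun x => x) false)
    (by simpa using PySem.List.sorted_pairwise scoville (fun x => x))
    (List.Pairwise.nil)
    (by intro m hm; simp at hm))
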